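-- pv_equiv track=rewrite | github.com/ubriela/cracking_coding | sorting.py | sortedMatrix2SortedArr
-- ===== SOURCE A (Python) =====
-- import heapq
--
-- def sortedMatrix2SortedArr(matrix):
--     """
--       [1,   4,  7, 11, 15],
--       [2,   5,  8, 12, 19],
--       [3,   6,  9, 16, 22],
--       [10, 13, 14, 17, 24],
--       [18, 21, 23, 26, 30]
--
--       q = 1         h = 1
--       q = 2,4,      h = 1,2,4
--       q = 4,3,5     h = 1,2,3,4,5
--       q = 3,5,7     h = 1,2,3,4,5,7
--
--       pick the smallest val to expand
--       1
--       2,4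
--       3,4,5
--       4,5,6,10
--       5,6,7,10
--       6,7,8,10
--     """
--     if not matrix or not matrix[0]:
--         return []
--     row = len(matrix)
--     col = len(matrix[0])
--     res = []
--     h = [(matrix[0][0], 0, 0)]  # (val, row, col)
--     visited = set([(0, 0)])  # (row, col)
--     while h:
--         val, i, j = heapq.heappop(h)  # smallest
--         res.append(val)
--
--         if i + 1 < row and (i + 1, j) not in visited:
--             visited.add((i + 1, j))
--             heapq.heappush(h, (matrix[i + 1][j], i + 1, j))
--         if j + 1 < col and (i, j + 1) not in visited:
--             visited.add((i, j + 1))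
--             heapq.heappush(h, (matrix[i][j + 1], i, j + 1))
--
--     return res
-- ===== SOURCE B (Python) =====
-- def sortedMatrix2SortedArr(matrix):
--     # frontier kept as a plain list sorted ascending by (val, i, j); pop head,
--     # insert neighbors at their sorted position by a linear scan (no heap).
--     if not matrix or not matrix[0]:
--         return []
--     row = len(matrix)
--     col = len(matrix[0])
--     res = []
--     frontier = [(matrix[0][0], 0, 0)]  # sorted ascending
--     visited = {(0, 0)}
--     while frontier:
--         val, i, j = frontier.pop(0)
--         res.append(val)
--         for (a, b) in ((i + 1, j), (i, j + 1)):
--             if a < row and b < col and (a, b) not in visited: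
--                 visited.add((a, b))
--                 t = (matrix[a][b], a, b)
--                 k = 0
--                 while k < len(frontier) and frontier[k] < t:
--                     k += 1
--                 frontier.insert(k, t)
--     return res
-- ===== Notes on version B (the rewrite author's own statement) =====
-- stated objective: alternative
-- what changed: Replaces the heapq priority-queue frontier with a plain Python list kept sorted ascending by (val,i,j): pop the head as the minimum and place each pushed neighbor by a linear insertion scan.
-- outside the precondition, e.g. on sortedMatrix2SortedArr([[1, 2], [3]]): A raises IndexError, B raises IndexError
import Mathlib
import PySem

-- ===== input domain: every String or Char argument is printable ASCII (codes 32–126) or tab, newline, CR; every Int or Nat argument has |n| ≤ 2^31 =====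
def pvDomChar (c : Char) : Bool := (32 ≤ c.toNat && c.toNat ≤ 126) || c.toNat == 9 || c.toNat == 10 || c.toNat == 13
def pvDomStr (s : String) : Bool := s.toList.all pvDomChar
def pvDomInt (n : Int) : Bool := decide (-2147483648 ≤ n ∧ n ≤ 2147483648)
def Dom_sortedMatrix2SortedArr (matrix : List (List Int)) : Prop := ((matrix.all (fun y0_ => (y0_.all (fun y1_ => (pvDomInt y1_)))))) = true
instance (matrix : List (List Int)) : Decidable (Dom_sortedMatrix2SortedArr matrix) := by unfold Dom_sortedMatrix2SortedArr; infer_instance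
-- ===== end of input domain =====

-- B replaces A's heapq frontier by a plain list kept sorted ascending (pop head,
-- linear-scan insertion); same values, a different frontier data structure ("alternative").

-- Python's tuple comparison (val, i, j) < (val', i', j') : lexicographic on Int triples.
def pvTlt (a b : Int × Int × Int) : Bool :=
  decide (a.1 < b.1) ||
    (decide (a.1 = b.1) &&
      (decide (a.2.1 < b.2.1) || (decide (a.2.1 = b.2.1) && decide (a.2.2 < b.2.2))))

-- matrix[i][j]; exact for the nonnegative in-range indices the loops use (bounds checks + Pre_).
def pvCell (m : List (List Int)) (i j : Int) : Int := (m.getD i.toNat []).getD j.toNat 0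

-- ===== PORT A =====
-- heapq modelled as a multiset-list: heappop = remove the (unique-keyed) minimum, heappush = add.
def pvHeapMin (x : Int × Int × Int) (xs : List (Int × Int × Int)) : Int × Int × Int :=
  xs.foldl (fun m y => if pvTlt y m then y else m) x

def pvRemoveFirst (v : Int × Int × Int) : List (Int × Int × Int) → List (Int × Int × Int)
  | [] => []
  | y :: ys => if y = v then ys else y :: pvRemoveFirst v ys

def pvLoopA (m : List (List Int)) (row col : Int) :
    Nat → List (Int × Int × Int) → PySem.Set (Int × Int) → List Int → List Int
  | 0, _, _, res => res
  | fuel+1, h, vis, res =>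
    match h with
    | [] => res
    | x :: xs =>
      let t := pvHeapMin x xs
      let h1 := pvRemoveFirst t (x :: xs)
      let i := t.2.1
      let j := t.2.2
      let res1 := res ++ [t.1]
      let s1 := if decide (i + 1 < row) && !(PySem.Set.contains vis (i + 1, j))
                then (h1 ++ [(pvCell m (i + 1) j, i + 1, j)], PySem.Set.add vis (i + 1, j))
                else (h1, vis)
      let s2 := if decide (j + 1 < col) && !(PySem.Set.contains s1.2 (i, j + 1))
                then (s1.1 ++ [(pvCell m i (j + 1), i, j + 1)], PySem.Set.add s1.2 (i, j + 1))
                else s1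
      pvLoopA m row col fuel s2.1 s2.2 res1

-- fuel = row*col bounds the iteration count: each cell enters the frontier at most once.
def sortedMatrix2SortedArr (matrix : List (List Int)) : List Int :=
  if matrix = [] ∨ matrix.headD [] = [] then []
  else pvLoopA matrix (matrix.length : Int) ((matrix.headD []).length : Int)
        (matrix.length * (matrix.headD []).length)
        [(pvCell matrix 0 0, 0, 0)] (PySem.Set.ofList [(0, 0)]) []

-- ===== PORT B =====
def pvInsSorted (t : Int × Int × Int) : List (Int × Int × Int) → List (Int × Int × Int)
  | [] => [t]
  | y :: ys => if pvTlt y t then y :: pvInsSorted t ys else t :: y :: ys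

def pvPush (m : List (List Int)) (row col : Int)
    (st : List (Int × Int × Int) × PySem.Set (Int × Int)) (c : Int × Int) :
    List (Int × Int × Int) × PySem.Set (Int × Int) :=
  if decide (c.1 < row) && decide (c.2 < col) && !(PySem.Set.contains st.2 c)
  then (pvInsSorted (pvCell m c.1 c.2, c.1, c.2) st.1, PySem.Set.add st.2 c)
  else st

def pvLoopB (m : List (List Int)) (row col : Int) :
    Nat → List (Int × Int × Int) → PySem.Set (Int × Int) → List Int → List Int
  | 0, _, _, res => res
  | fuel+1, h, vis, res =>
    match h with
    | [] => res
    | x :: xs =>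
      let st := [(x.2.1 + 1, x.2.2), (x.2.1, x.2.2 + 1)].foldl (pvPush m row col) (xs, vis)
      pvLoopB m row col fuel st.1 st.2 (res ++ [x.1])

def sortedMatrix2SortedArr_alt (matrix : List (List Int)) : List Int :=
  if matrix = [] ∨ matrix.headD [] = [] then []
  else pvLoopB matrix (matrix.length : Int) ((matrix.headD []).length : Int)
        (matrix.length * (matrix.headD []).length)
        [(pvCell matrix 0 0, 0, 0)] (PySem.Set.ofList [(0, 0)]) []

-- ===== PRECONDITION & SPEC =====
-- Pre_ excludes ragged matrices with some row shorter than the first row: there the Python A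
-- (and B) hits matrix[i][j] past that row's end and raises IndexError.
def Pre_sortedMatrix2SortedArr (matrix : List (List Int)) : Prop :=
  ∀ r ∈ matrix, (matrix.headD []).length ≤ r.length
instance (matrix : List (List Int)) : Decidable (Pre_sortedMatrix2SortedArr matrix) := by
  unfold Pre_sortedMatrix2SortedArr; infer_instance
def pvWitness_sortedMatrix2SortedArr : List (List Int) := [[1, 4], [2, 5], [3, 6]]

def Spec_sortedMatrix2SortedArr (matrix : List (List Int)) (out : List Int) : Prop := out = sortedMatrix2SortedArr_alt matrix
instance (matrix : List (List Int)) (out : List Int) : Decidable (Spec_sortedMatrix2SortedArr matrix out) := by unfold Spec_sortedMatrix2SortedArr; infer_instance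

-- ===== CLAIM (what is proved, stated in full; the proofs are below) =====
def Claim_equal_sortedMatrix2SortedArr : Prop := ∀ (matrix : List (List Int)), Dom_sortedMatrix2SortedArr matrix → Pre_sortedMatrix2SortedArr matrix → Spec_sortedMatrix2SortedArr matrix (sortedMatrix2SortedArr matrix)

-- ===== LEMMAS AND PROOFS =====

theorem pvTlt_irrefl (a : Int × Int × Int) : pvTlt a a = false := by
  simp [pvTlt]

theorem pvTlt_asymm {a b : Int × Int × Int} (h : pvTlt a b = true) : pvTlt b a = false := by
  obtain ⟨a1, a2, a3⟩ := a; obtain ⟨b1, b2, b3⟩ := b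
  simp [pvTlt] at h ⊢; omega

theorem pvTlt_antisymm {a b : Int × Int × Int} (h1 : pvTlt a b = false)
    (h2 : pvTlt b a = false) : a = b := by
  obtain ⟨a1, a2, a3⟩ := a; obtain ⟨b1, b2, b3⟩ := b
  simp [pvTlt] at h1 h2 ⊢; omega

theorem pvTlt_trans {a b c : Int × Int × Int} (h1 : pvTlt a b = true)
    (h2 : pvTlt b c = true) : pvTlt a c = true := by
  obtain ⟨a1, a2, a3⟩ := a; obtain ⟨b1, b2, b3⟩ := b; obtain ⟨c1, c2, c3⟩ := c
  simp [pvTlt] at h1 h2 ⊢; omega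

theorem pvTlt_neg_trans {a b c : Int × Int × Int} (h1 : pvTlt b a = false)
    (h2 : pvTlt c b = false) : pvTlt c a = false := by
  obtain ⟨a1, a2, a3⟩ := a; obtain ⟨b1, b2, b3⟩ := b; obtain ⟨c1, c2, c3⟩ := c
  simp [pvTlt] at h1 h2 ⊢; omega

theorem pvHeapMin_mem : ∀ (xs : List (Int × Int × Int)) (x), pvHeapMin x xs ∈ x :: xs := by
  intro xs
  induction xs with
  | nil => intro x; simp [pvHeapMin]
  | cons y ys ih =>
    intro x
    have h : pvHeapMin x (y :: ys) = pvHeapMin (if pvTlt y x then y else x) ys := rfl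
    rw [h]
    rcases List.mem_cons.1 (ih (if pvTlt y x then y else x)) with hm | hm
    · rw [hm]; split_ifs <;> simp
    · simp [hm]


theorem pvHeapMin_le : ∀ (xs : List (Int × Int × Int)) (x z), z ∈ x :: xs →
    pvTlt z (pvHeapMin x xs) = false := by
  intro xs
  induction xs with
  | nil => intro x z hz; simp at hz; subst hz; exact pvTlt_irrefl _
  | cons y ys ih =>
    intro x z hz
    have h : pvHeapMin x (y :: ys) = pvHeapMin (if pvTlt y x then y else x) ys := rfl
    rw [h]
    set x' := if pvTlt y x then y else x with hx'
    have hx'le : pvTlt x' (pvHeapMin x' ys) = false := ih x' x' (by simp)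
    rcases List.mem_cons.1 hz with rfl | hz2
    · by_cases hyx : pvTlt y z = true
      · have hx'y : x' = y := by rw [hx', if_pos hyx]
        rw [hx'y] at hx'le ⊢
        by_cases hc : pvTlt z (pvHeapMin y ys) = true
        · have := pvTlt_trans hyx hc
          rw [this] at hx'le
          simp at hx'le
        · simpa using hc
      · have hx'x : x' = z := by rw [hx', if_neg hyx]
        rw [hx'x] at hx'le ⊢
        exact hx'le
    · rcases List.mem_cons.1 hz2 with rfl | hz3
      · by_cases hyx : pvTlt z x = true
        · have hx'y : x' = z := by rw [hx', if_pos hyx]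
          rw [hx'y] at hx'le ⊢
          exact hx'le
        · have hx'x : x' = x := by rw [hx', if_neg hyx]
          rw [hx'x] at hx'le ⊢
          simp only [Bool.not_eq_true] at hyx
          exact pvTlt_neg_trans hx'le hyx
      · exact ih x' z (List.mem_cons.2 (Or.inr hz3))


theorem pvRemoveFirst_perm : ∀ (l : List (Int × Int × Int)) (v), v ∈ l →
    l.Perm (v :: pvRemoveFirst v l) := by
  intro l
  induction l with
  | nil => intro v hv; simp at hv
  | cons y ys ih =>
    intro v hv
    by_cases h : y = v
    · subst h; simp [pvRemoveFirst]
    · have hv2 : v ∈ ys := by rcases List.mem_cons.1 hv with h' | h'; exact absurd h'.symm h; exact h'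
      have : pvRemoveFirst v (y :: ys) = y :: pvRemoveFirst v ys := by simp [pvRemoveFirst, h]
      rw [this]
      exact ((ih v hv2).cons y).trans (List.Perm.swap v y _)


theorem pvInsSorted_perm : ∀ (l : List (Int × Int × Int)) (t),
    (pvInsSorted t l).Perm (t :: l) := by
  intro l
  induction l with
  | nil => intro t; simp [pvInsSorted]
  | cons y ys ih =>
    intro t
    by_cases h : pvTlt y t = true
    · simp only [pvInsSorted, h, if_true]
      exact ((ih t).cons y).trans (List.Perm.swap t y _)
    · simp only [pvInsSorted, h]
      simp at h
      simp


theorem pvInsSorted_sorted : ∀ (l : List (Int × Int × Int)) (t),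
    l.Pairwise (fun a b => pvTlt b a = false) →
    (pvInsSorted t l).Pairwise (fun a b => pvTlt b a = false) := by
  intro l
  induction l with
  | nil => intro t _; simp [pvInsSorted]
  | cons y ys ih =>
    intro t hs
    rw [List.pairwise_cons] at hs
    by_cases h : pvTlt y t = true
    · have : pvInsSorted t (y :: ys) = y :: pvInsSorted t ys := by simp [pvInsSorted, h]
      rw [this, List.pairwise_cons]
      refine ⟨?_, ih t hs.2⟩
      intro z hz
      have := (pvInsSorted_perm ys t).mem_iff.1 hz
      rcases List.mem_cons.1 this with rfl | hz2
      · exact pvTlt_asymm h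
      · exact hs.1 z hz2
    · have : pvInsSorted t (y :: ys) = t :: y :: ys := by simp [pvInsSorted, h]
      rw [this, List.pairwise_cons]
      simp at h
      refine ⟨?_, List.pairwise_cons.2 hs⟩
      intro z hz
      rcases List.mem_cons.1 hz with rfl | hz2
      · simpa using h
      · exact pvTlt_neg_trans (by simpa using h) (hs.1 z hz2)

theorem pvPushApp_perm {l1 l2 : List (Int × Int × Int)} (e : Int × Int × Int)
    (h : l1.Perm l2) : (l1 ++ [e]).Perm (pvInsSorted e l2) :=
  (List.perm_append_singleton e l1).trans ((h.cons e).trans (pvInsSorted_perm l2 e).symm)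


theorem pvLoop_eq (m : List (List Int)) (row col : Int) :
    ∀ (fuel : Nat) (hA hB : List (Int × Int × Int)) (vis : PySem.Set (Int × Int))
      (res : List Int), hA.Perm hB → hB.Pairwise (fun a b => pvTlt b a = false) →
      (∀ p ∈ hA, p.2.1 < row ∧ p.2.2 < col) →
      pvLoopA m row col fuel hA vis res = pvLoopB m row col fuel hB vis res := by
  intro fuel
  induction fuel with
  | zero => intros; rfl
  | succ n ih =>
    intro hA hB vis res hperm hsort hbd
    cases hB with
    | nil =>
      rw [hperm.eq_nil]
      simp [pvLoopA, pvLoopB]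
    | cons b bs =>
      cases hA with
      | nil => exact absurd hperm.symm.eq_nil (by simp)
      | cons x xs =>
        have ht : pvHeapMin x xs = b := by
          have htmem : pvHeapMin x xs ∈ b :: bs := hperm.mem_iff.1 (pvHeapMin_mem xs x)
          have hble : pvTlt b (pvHeapMin x xs) = false :=
            pvHeapMin_le xs x b (hperm.symm.mem_iff.1 (by simp))
          rcases List.mem_cons.1 htmem with h' | h'
          · exact h'
          · exact pvTlt_antisymm ((List.pairwise_cons.1 hsort).1 _ h') hble
        obtain ⟨hbr, hbc⟩ : b.2.1 < row ∧ b.2.2 < col := by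
          rw [← ht]; exact hbd _ (pvHeapMin_mem xs x)
        have hsub : ∀ p ∈ pvRemoveFirst (pvHeapMin x xs) (x :: xs), p ∈ x :: xs := by
          intro p hp
          exact (pvRemoveFirst_perm (x :: xs) _ (pvHeapMin_mem xs x)).mem_iff.2 (by simp [hp])
        have hrem : (pvRemoveFirst (pvHeapMin x xs) (x :: xs)).Perm bs := by
          have h1 := pvRemoveFirst_perm (x :: xs) _ (pvHeapMin_mem xs x)
          have h2 : (pvHeapMin x xs :: pvRemoveFirst (pvHeapMin x xs) (x :: xs)).Perm
              (pvHeapMin x xs :: bs) := h1.symm.trans (hperm.trans (by rw [ht]))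
          exact h2.cons_inv
        rw [ht] at hsub hrem
        have hsort' := (List.pairwise_cons.1 hsort).2
        simp only [pvLoopA, pvLoopB, List.foldl, ht]
        simp only [pvPush, decide_eq_true hbc, decide_eq_true hbr, Bool.true_and, Bool.and_true]
        by_cases hc1 : (decide (b.2.1 + 1 < row) && !(PySem.Set.contains vis (b.2.1 + 1, b.2.2))) = true
        · have hr1 : b.2.1 + 1 < row := by
            have h2 := (Bool.and_eq_true _ _).mp hc1; exact of_decide_eq_true h2.1
          simp only [hc1, if_true]
          by_cases hc2 : (decide (b.2.2 + 1 < col) &&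
              !(PySem.Set.contains (PySem.Set.add vis (b.2.1 + 1, b.2.2)) (b.2.1, b.2.2 + 1))) = true
          · have hcc2 : b.2.2 + 1 < col := by
              have h2 := (Bool.and_eq_true _ _).mp hc2; exact of_decide_eq_true h2.1
            simp only [hc2, if_true]
            apply ih
            · exact pvPushApp_perm _ (pvPushApp_perm _ hrem)
            · exact pvInsSorted_sorted _ _ (pvInsSorted_sorted _ _ hsort')
            · intro p hp
              rcases List.mem_append.1 hp with hp1 | hp1
              · rcases List.mem_append.1 hp1 with hp2 | hp2
                · exact hbd p (hsub p hp2)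
                · simp at hp2; subst hp2; exact ⟨hr1, hbc⟩
              · simp at hp1; subst hp1; exact ⟨hbr, hcc2⟩
          · rw [Bool.not_eq_true] at hc2
            simp only [hc2, Bool.false_eq_true, if_false]
            apply ih
            · exact pvPushApp_perm _ hrem
            · exact pvInsSorted_sorted _ _ hsort'
            · intro p hp
              rcases List.mem_append.1 hp with hp1 | hp1
              · exact hbd p (hsub p hp1)
              · simp at hp1; subst hp1; exact ⟨hr1, hbc⟩
        · rw [Bool.not_eq_true] at hc1
          simp only [hc1, Bool.false_eq_true, if_false]
          by_cases hc2 : (decide (b.2.2 + 1 < col) &&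
              !(PySem.Set.contains vis (b.2.1, b.2.2 + 1))) = true
          · have hcc2 : b.2.2 + 1 < col := by
              have h2 := (Bool.and_eq_true _ _).mp hc2; exact of_decide_eq_true h2.1
            simp only [hc2, if_true]
            apply ih
            · exact pvPushApp_perm _ hrem
            · exact pvInsSorted_sorted _ _ hsort'
            · intro p hp
              rcases List.mem_append.1 hp with hp1 | hp1
              · exact hbd p (hsub p hp1)
              · simp at hp1; subst hp1; exact ⟨hbr, hcc2⟩
          · rw [Bool.not_eq_true] at hc2
            simp only [hc2, Bool.false_eq_true, if_false]
            exact ih _ _ _ _ hrem hsort' (fun p hp => hbd p (hsub p hp))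

-- ===== VERDICT (by name: the statement is the Claim_ definition above) =====
theorem sortedMatrix2SortedArr_spec : Claim_equal_sortedMatrix2SortedArr := by
  intro matrix _ _
  unfold Spec_sortedMatrix2SortedArr sortedMatrix2SortedArr sortedMatrix2SortedArr_alt
  split_ifs with hg
  · rfl
  · apply pvLoop_eq
    · exact List.Perm.refl _
    · simp
    · intro p hp
      simp at hp
      subst hp
      rw [not_or] at hg
      obtain ⟨h1, h2⟩ := hg
      constructor
      · simpa using List.length_pos_of_ne_nil h1
      · simpa using List.length_pos_of_ne_nil h2
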